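-- pv_equiv track=rewrite | github.com/JoJaJones/AoC2019 | Day4/day_solution.py | filter_over_repeats
-- ===== SOURCE A (Python) =====
-- def filter_over_repeats(data):
--     filtered_data = []
--     for num in data:
--         counts = {}
--         for digit in num:
--             if digit in counts:
--                 counts[digit] += 1
--             else:
--                 counts[digit] = 1
--
--         if 2 in counts.values():
--             filtered_data.append(num)
--
--     return filtered_data
-- ===== SOURCE B (Python) =====
-- def filter_over_repeats(data):
--     return [num for num in data
--             if any(sum(1 for e in num if e == d) == 2 for d in num)]
-- ===== Notes on version B (the rewrite author's own statement) =====
-- stated objective: simpler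
-- what changed: Replaces the explicit dict-of-counts loop and values() membership test with a single comprehension that keeps a number when some digit's occurrence count (computed by a direct scan) is exactly 2.
import Mathlib
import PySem

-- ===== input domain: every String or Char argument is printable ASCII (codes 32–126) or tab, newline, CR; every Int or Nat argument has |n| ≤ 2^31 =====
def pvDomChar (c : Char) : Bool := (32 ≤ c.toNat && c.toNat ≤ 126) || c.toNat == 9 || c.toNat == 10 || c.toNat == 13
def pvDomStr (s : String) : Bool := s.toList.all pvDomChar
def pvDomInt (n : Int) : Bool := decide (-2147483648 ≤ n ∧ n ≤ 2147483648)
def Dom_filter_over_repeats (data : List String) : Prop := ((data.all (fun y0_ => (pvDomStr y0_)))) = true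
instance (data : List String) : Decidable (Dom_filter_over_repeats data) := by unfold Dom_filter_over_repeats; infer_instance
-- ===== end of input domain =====

-- B replaces A's dict-of-counts loop with a comprehension that keeps a number when some
-- character's occurrence count (by a direct scan) is exactly 2; simpler, not faster.

-- ===== PORT A =====
def filter_over_repeats (data : List String) : List String :=
  data.foldl (fun filtered_data num =>
    let counts : PySem.Dict Char Int :=
      num.toList.foldl (fun counts digit =>
        if counts.contains digit then
          counts.modify digit 0 (· + 1)        -- counts[digit] += 1
        else
          counts.insert digit 1)               -- counts[digit] = 1
        PySem.Dict.empty
    if counts.values.contains (2 : Int) then filtered_data ++ [num] else filtered_data) []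

-- ===== PORT B =====
def filter_over_repeats_alt (data : List String) : List String :=
  data.filter (fun num =>
    num.toList.any (fun d =>
      (num.toList.foldl (fun acc e => if e == d then acc + 1 else acc) (0 : Int)) == 2))

-- ===== PRECONDITION & SPEC =====
def Spec_filter_over_repeats (data : List String) (out : List String) : Prop := out = filter_over_repeats_alt data
instance (data : List String) (out : List String) : Decidable (Spec_filter_over_repeats data out) := by unfold Spec_filter_over_repeats; infer_instance

-- ===== CLAIM (what is proved, stated in full; the proofs are below) =====
def Claim_equal_filter_over_repeats : Prop := ∀ (data : List String), Dom_filter_over_repeats data → Spec_filter_over_repeats data (filter_over_repeats data)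

-- ===== LEMMAS AND PROOFS =====

-- A's dict-building step is exactly the Counter step.
theorem pv_step_eq_counter_step (d : PySem.Dict Char Int) (c : Char) :
    (if d.contains c then d.modify c 0 (· + 1) else d.insert c 1) = d.modify c 0 (· + 1) := by
  by_cases h : d.contains c = true
  · simp [h]
  · simp only [Bool.not_eq_true] at h
    rw [if_neg (by simp [h]), PySem.Dict.modify, PySem.Dict.getD_of_not_contains (d := d) (d0 := 0) h]; norm_num

theorem pv_counts_eq_counter (s : List Char) :
    (s.foldl (fun counts digit =>
        if counts.contains digit then counts.modify digit 0 (· + 1)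
        else counts.insert digit 1) PySem.Dict.empty)
      = PySem.Dict.counter s := by
  rw [PySem.Dict.counter_eq_foldl]
  congr 1
  funext d c
  exact pv_step_eq_counter_step d c

-- The per-string tests of A and B agree.
theorem pv_test_eq (s : List Char) :
    ((PySem.Dict.counter s).values.contains (2 : Int))
      = s.any (fun d => (s.foldl (fun acc e => if e == d then acc + 1 else acc) (0 : Int)) == 2) := by
  have hv : (PySem.Dict.counter s).values
      = (PySem.Set.ofList s).map (fun k => ((s.count k : Int))) := by
    have := PySem.Dict.items_counter (xs := s)
    simp only [PySem.Dict.values, this, List.map_map]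
    rfl
  simp only [hv]
  simp only [PySem.List.foldl_beq_add_one, zero_add]
  by_cases h : ∃ d ∈ s, (s.count d : Int) = 2
  · obtain ⟨d, hd, hcnt⟩ := h
    have h1 : (2 : Int) ∈ (PySem.Set.ofList s).map (fun k => ((s.count k : Int))) := by
      exact List.mem_map.mpr ⟨d, (PySem.Set.mem_ofList s d).mpr hd, hcnt⟩
    have h2 : s.any (fun d => ((s.count d : Int)) == 2) = true := by
      exact List.any_eq_true.mpr ⟨d, hd, by simp [hcnt]⟩
    simp [h1, h2]
  · have h1 : (2 : Int) ∉ (PySem.Set.ofList s).map (fun k => ((s.count k : Int))) := by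
      intro hmem
      obtain ⟨d, hd, hcnt⟩ := List.mem_map.mp hmem
      exact h ⟨d, (PySem.Set.mem_ofList s d).mp hd, hcnt⟩
    have h2 : s.any (fun d => ((s.count d : Int)) == 2) = false := by
      rw [List.any_eq_false]
      intro d hd
      simp only [beq_iff_eq]
      exact fun hc => h ⟨d, hd, hc⟩
    simp [h1, h2]

-- ===== VERDICT (by name: the statement is the Claim_ definition above) =====
theorem filter_over_repeats_spec : Claim_equal_filter_over_repeats := by
  intro data _
  unfold Spec_filter_over_repeats filter_over_repeats filter_over_repeats_alt
  simp only [pv_counts_eq_counter, pv_test_eq]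
  rw [PySem.List.foldl_append_if_eq_filter]
  simp
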